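-- pv_equiv track=rewrite | github.com/AnasImloul/Leetcode-Solutions | algorithms/M/Minimum Number of Operations to Reinitialize a Permutation/Minimum Number of Operations to Reinitialize a Permutation.py | check
-- ===== SOURCE A (Python) =====
-- def check(perm,n) :
--     arr =[]
--     for i in range(len(perm)):
--         if i % 2 == 0:
--             arr.append(perm[i//2])
--         if i % 2 == 1:
--             arr.append(perm[n//2 + (i-1)//2])
--     return arr
-- ===== SOURCE B (Python) =====
-- def check(perm, n):
--     m = len(perm)
--     front = perm[:(m + 1) // 2]
--     back = [perm[n // 2 + j] for j in range(m // 2)]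
--     out = []
--     for a, b in zip(front, back):
--         out.append(a)
--         out.append(b)
--     if len(front) > len(back):
--         out.append(front[-1])
--     return out
-- ===== Notes on version B (the rewrite author's own statement) =====
-- stated objective: alternative
-- what changed: A walks one index loop over range(len(perm)) with a per-index parity branch choosing which half to read; B precomputes the front-half slice and the back-half element list, zip-interleaves them, and appends the odd-length leftover.
import Mathlib
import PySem

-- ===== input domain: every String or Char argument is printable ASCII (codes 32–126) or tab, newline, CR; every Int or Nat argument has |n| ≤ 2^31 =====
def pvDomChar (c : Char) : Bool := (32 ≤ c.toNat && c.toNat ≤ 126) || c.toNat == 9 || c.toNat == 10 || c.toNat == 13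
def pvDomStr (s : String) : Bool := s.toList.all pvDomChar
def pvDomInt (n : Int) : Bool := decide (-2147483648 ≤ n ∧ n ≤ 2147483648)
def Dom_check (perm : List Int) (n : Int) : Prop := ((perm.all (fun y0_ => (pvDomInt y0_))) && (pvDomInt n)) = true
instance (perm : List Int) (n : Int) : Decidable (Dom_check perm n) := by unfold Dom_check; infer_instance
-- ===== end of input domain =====

-- B replaces A's single loop with a per-index parity branch by a two-source
-- merge: build the front half and the back half first, then zip-interleave
-- them (objective: alternative decomposition, same cost).

-- ===== PORT A =====
def check (perm : List Int) (n : Int) : List Int :=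
  (PySem.List.pyRange 0 (perm.length : Int) 1).foldl (fun arr i =>
    let arr := if PySem.Int.mod i 2 = 0
      then arr ++ [PySem.List.pyGetD perm (PySem.Int.floordiv i 2) 0] else arr
    if PySem.Int.mod i 2 = 1
      then arr ++ [PySem.List.pyGetD perm (PySem.Int.floordiv n 2 + PySem.Int.floordiv (i - 1) 2) 0] else arr) []

-- ===== PORT B =====
def check_alt (perm : List Int) (n : Int) : List Int :=
  let m : Int := perm.length
  let front := PySem.List.slice perm none (some (PySem.Int.floordiv (m + 1) 2))
  let back := (PySem.List.pyRange 0 (PySem.Int.floordiv m 2) 1).map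
      (fun j => PySem.List.pyGetD perm (PySem.Int.floordiv n 2 + j) 0)
  let out := (front.zip back).foldl (fun out p => (out ++ [p.1]) ++ [p.2]) []
  if back.length < front.length then out ++ [PySem.List.pyGetD front (-1) 0] else out

-- ===== PRECONDITION & SPEC =====
-- Pre_ excludes exactly the inputs where Python A raises IndexError: with at
-- least two elements every used back-half index n//2 + j (j = 0 … len//2 - 1)
-- must lie in Python's (negative-wrapping) valid range [-len, len).
def Pre_check (perm : List Int) (n : Int) : Prop :=
  perm.length < 2 ∨
    (-(perm.length : Int) ≤ PySem.Int.floordiv n 2 ∧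
      PySem.Int.floordiv n 2 + (perm.length / 2 : Nat) ≤ (perm.length : Int))
instance (perm : List Int) (n : Int) : Decidable (Pre_check perm n) := by
  unfold Pre_check; infer_instance

def pvWitness_check : List Int × Int := ([3, 1, 4, 1, 5], 5)

def Spec_check (perm : List Int) (n : Int) (out : List Int) : Prop := out = check_alt perm n
instance (perm : List Int) (n : Int) (out : List Int) : Decidable (Spec_check perm n out) := by
  unfold Spec_check; infer_instance

-- ===== CLAIM (what is proved, stated in full; the proofs are below) =====
def Claim_equal_check : Prop := ∀ (perm : List Int) (n : Int), Dom_check perm n → Pre_check perm n → Spec_check perm n (check perm n)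

-- ===== LEMMAS AND PROOFS =====

-- A's fold appends exactly one element per index (the parity branches are exclusive),
-- so A is the image of an index map over range(len(perm)).
theorem check_eq_map (perm : List Int) (n : Int) :
    check perm n = (List.range perm.length).map (fun k =>
      if k % 2 = 0 then PySem.List.pyGetD perm ((k / 2 : Nat) : Int) 0
      else PySem.List.pyGetD perm (PySem.Int.floordiv n 2 + (((k - 1) / 2 : Nat) : Int)) 0) := by
  unfold check
  rw [PySem.List.pyRange_zero_nat perm.length]
  rw [List.foldl_map]
  have hstep : (fun (arr : List Int) (k : Nat) =>
      (fun arr (i : Int) =>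
        let arr := if PySem.Int.mod i 2 = 0
          then arr ++ [PySem.List.pyGetD perm (PySem.Int.floordiv i 2) 0] else arr
        if PySem.Int.mod i 2 = 1
          then arr ++ [PySem.List.pyGetD perm (PySem.Int.floordiv n 2 + PySem.Int.floordiv (i - 1) 2) 0] else arr) arr (k : Int))
      = fun arr k => arr ++ [if k % 2 = 0 then PySem.List.pyGetD perm ((k / 2 : Nat) : Int) 0
        else PySem.List.pyGetD perm (PySem.Int.floordiv n 2 + (((k - 1) / 2 : Nat) : Int)) 0] := by
    funext arr k
    rcases Nat.even_or_odd k with hk | hk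
    · obtain ⟨t, ht⟩ := hk
      have h0 : k % 2 = 0 := by omega
      simp [h0, show ((2:Int) ∣ (k:Int)) from by omega, show ¬(((k:Int)) % 2 = 1) from by omega]
    · obtain ⟨t, ht⟩ := hk
      have h1 : k % 2 = 1 := by omega
      have : ((k : Int) - 1) = ((k - 1 : Nat) : Int) := by omega
      simp [h1, this, show ((k:Int)) % 2 = 1 from by omega]
  rw [hstep]
  simpa using PySem.List.foldl_append_singleton_eq_map _ _ []

-- the zip-interleave of two t-element prefixes is the even-length index map
theorem interleave_key (t : Nat) (F G : Nat → Int) :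
    (List.range (2 * t)).map (fun k => if k % 2 = 0 then F (k / 2) else G ((k - 1) / 2))
      = (((List.range t).map F).zip ((List.range t).map G)).foldl
          (fun o p => (o ++ [p.1]) ++ [p.2]) [] := by
  induction t with
  | zero => simp
  | succ s ih =>
    have h2 : 2 * (s + 1) = (2 * s + 1) + 1 := by ring
    rw [h2, List.range_succ, List.range_succ, List.range_succ, List.map_append, List.map_append,
      List.map_append, List.map_append]
    rw [List.zip_append (by simp), List.foldl_append]
    rw [← ih]
    simp

theorem take_eq_map_range (perm : List Int) (t : Nat) (h : t ≤ perm.length) :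
    perm.take t = (List.range t).map (fun (j : Nat) => PySem.List.pyGetD perm (j : Int) 0) := by
  apply List.ext_getElem
  · simp; omega
  · intro i h1 h2
    simp only [List.getElem_take, List.getElem_map, List.getElem_range,
      PySem.List.pyGetD_natCast]
    rw [List.getD_eq_getElem _ _ (by simp at h1; omega)]

-- B with its slice and pyRange normalised to maps over Nat ranges
theorem check_alt_unfolded (perm : List Int) (n : Int) :
    check_alt perm n =
      (let front := (List.range ((perm.length + 1) / 2)).map
          (fun (j : Nat) => PySem.List.pyGetD perm (j : Int) 0)
       let back := (List.range (perm.length / 2)).map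
          (fun (j : Nat) => PySem.List.pyGetD perm (PySem.Int.floordiv n 2 + (j : Int)) 0)
       let out := (front.zip back).foldl (fun out p => (out ++ [p.1]) ++ [p.2]) []
       if back.length < front.length then out ++ [PySem.List.pyGetD front (-1) 0] else out) := by
  have hm1 : ((perm.length : Int) + 1) = ((perm.length + 1 : Nat) : Int) := by push_cast; ring
  have hslice : PySem.List.slice perm none (some (PySem.Int.floordiv ((perm.length : Int) + 1) 2))
      = perm.take ((perm.length + 1) / 2) := by
    rw [hm1]
    rw [show PySem.Int.floordiv ((perm.length + 1 : Nat) : Int) 2 = (((perm.length + 1) / 2 : Nat) : Int) from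
      by exact_mod_cast PySem.Int.floordiv_natCast (perm.length + 1) 2]
    exact PySem.List.slice_to_natCast perm _
  have hback : PySem.Int.floordiv ((perm.length : Int)) 2 = ((perm.length / 2 : Nat) : Int) := by
    exact_mod_cast PySem.Int.floordiv_natCast perm.length 2
  unfold check_alt
  simp only [hslice, hback, PySem.List.pyRange_zero_nat, List.map_map]
  rw [take_eq_map_range perm ((perm.length + 1) / 2) (by omega)]
  rfl

-- the ports agree on every input (Pre_ is only needed for faithfulness to Python)
theorem check_eq_check_alt (perm : List Int) (n : Int) : check perm n = check_alt perm n := by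
  rw [check_eq_map, check_alt_unfolded]
  rcases Nat.even_or_odd perm.length with ⟨t, ht⟩ | ⟨t, ht⟩
  · -- even length: front and back both have t elements, no leftover
    have h1 : (perm.length + 1) / 2 = t := by omega
    have h2 : perm.length / 2 = t := by omega
    have h3 : perm.length = 2 * t := by omega
    rw [h1, h2, h3]
    rw [interleave_key t (fun (j : Nat) => PySem.List.pyGetD perm (j : Int) 0)
      (fun (j : Nat) => PySem.List.pyGetD perm (PySem.Int.floordiv n 2 + (j : Int)) 0)]
    simp
  · -- odd length: front has one extra element, appended after the zip
    have h1 : (perm.length + 1) / 2 = t + 1 := by omega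
    have h2 : perm.length / 2 = t := by omega
    have h3 : perm.length = 2 * t + 1 := by omega
    rw [h1, h2, h3]
    simp only
    rw [List.range_succ, List.map_append, List.range_succ, List.map_append,
      List.map_cons, List.map_nil]
    rw [show ((List.range t).map (fun (j : Nat) =>
        PySem.List.pyGetD perm (PySem.Int.floordiv n 2 + (j : Int)) 0))
      = ((List.range t).map (fun (j : Nat) =>
        PySem.List.pyGetD perm (PySem.Int.floordiv n 2 + (j : Int)) 0)) ++ [] from by simp]
    rw [List.zip_append (by simp)]
    simp only [List.zip_nil_right, List.append_nil]
    rw [← interleave_key t (fun (j : Nat) => PySem.List.pyGetD perm (j : Int) 0)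
      (fun (j : Nat) => PySem.List.pyGetD perm (PySem.Int.floordiv n 2 + (j : Int)) 0)]
    simp only [List.map_cons, List.map_nil]
    rw [if_pos (by simp)]
    rw [PySem.List.pyGetD_neg_one_append_singleton]
    simp

-- ===== VERDICT (by name: the statement is the Claim_ definition above) =====
theorem check_spec : Claim_equal_check := by
  intro perm n _ _
  unfold Spec_check
  exact check_eq_check_alt perm n
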